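-- pv_equiv track=rewrite | github.com/chartmann1590/Wedding-Outreach | app_enhanced.py | detect_csv_fields
-- ===== SOURCE A (Python) =====
-- def detect_csv_fields(headers):
--     """Automatically detect field mappings from CSV headers"""
--     headers_lower = [h.lower().strip() for h in headers]
--
--     # Name field detection (required)
--     name_candidates = [
--         "name",
--         "full name",
--         "fullname",
--         "guest name",
--         "guest",
--         "person",
--         "contact",
--     ]
--     name_field = None
--     for candidate in name_candidates:
--         for i, header in enumerate(headers_lower):
--             if candidate in header:
--                 name_field = headers[i]
--                 break
--         if name_field:
--             break
--
--     # Address field detection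
--     address_candidates = [
--         "address",
--         "mailing address",
--         "street address",
--         "addr",
--         "location",
--         "home address",
--     ]
--     address_field = None
--     for candidate in address_candidates:
--         for i, header in enumerate(headers_lower):
--             if candidate in header:
--                 address_field = headers[i]
--                 break
--         if address_field:
--             break
--
--     # Notes field detection
--     notes_candidates = [
--         "notes",
--         "note",
--         "comments",
--         "comment",
--         "description",
--         "details",
--         "info",
--         "remarks",
--     ]
--     notes_field = None
--     for candidate in notes_candidates:
--         for i, header in enumerate(headers_lower):
--             if candidate in header:
--                 notes_field = headers[i]
--                 break
--         if notes_field: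
--             break
--
--     # Facebook field detection
--     facebook_candidates = [
--         "facebook",
--         "fb",
--         "facebook profile",
--         "fb profile",
--         "social media",
--         "facebook_profile",
--     ]
--     facebook_field = None
--     for candidate in facebook_candidates:
--         for i, header in enumerate(headers_lower):
--             if candidate in header:
--                 facebook_field = headers[i]
--                 break
--         if facebook_field:
--             break
--
--     return {
--         "name": name_field,
--         "address": address_field,
--         "notes": notes_field,
--         "facebook": facebook_field,
--     }
-- ===== SOURCE B (Python) =====
-- FIELD_CANDIDATES = [
--     ("name", ["name", "full name", "fullname", "guest name", "guest", "person", "contact"]),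
--     ("address", ["address", "mailing address", "street address", "addr", "location", "home address"]),
--     ("notes", ["notes", "note", "comments", "comment", "description", "details", "info", "remarks"]),
--     ("facebook", ["facebook", "fb", "facebook profile", "fb profile", "social media", "facebook_profile"]),
-- ]
--
--
-- def _pick(headers, candidates):
--     # header-major argmin: for each header take the rank of the first matching
--     # candidate; keep the header with the smallest rank (first header wins ties).
--     best = None  # (rank, original header)
--     for orig in headers:
--         low = orig.lower().strip()
--         rank = next((r for r, c in enumerate(candidates) if c in low), None)
--         if rank is not None and (best is None or rank < best[0]):
--             best = (rank, orig)
--     return best[1] if best is not None else None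
--
--
-- def detect_csv_fields(headers):
--     """Automatically detect field mappings from CSV headers"""
--     return {key: _pick(headers, cands) for key, cands in FIELD_CANDIDATES}
-- ===== Notes on version B (the rewrite author's own statement) =====
-- stated objective: alternative
-- what changed: Replaces A's four candidate-major nested loops with early breaks by a single shared header-major routine: one pass over the headers computing, per header, the rank of the first matching candidate and keeping the argmin (first header wins ties).
import Mathlib
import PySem

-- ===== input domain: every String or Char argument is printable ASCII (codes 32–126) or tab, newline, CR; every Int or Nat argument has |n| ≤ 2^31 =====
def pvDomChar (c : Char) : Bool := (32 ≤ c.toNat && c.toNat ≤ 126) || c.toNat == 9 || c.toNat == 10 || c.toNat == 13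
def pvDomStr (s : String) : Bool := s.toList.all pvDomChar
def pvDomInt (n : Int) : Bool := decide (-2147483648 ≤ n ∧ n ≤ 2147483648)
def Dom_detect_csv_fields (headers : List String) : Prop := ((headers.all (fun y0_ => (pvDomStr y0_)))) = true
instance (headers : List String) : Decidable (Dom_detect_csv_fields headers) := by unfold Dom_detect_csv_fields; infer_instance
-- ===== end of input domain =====

-- B replaces A's candidate-major nested loops with one header-major argmin pass per field
-- (rank of first matching candidate, first header wins ties); same return value, alternative decomposition.

-- ===== PORT A =====

def pvLowerStrip (h : String) : String := PySem.Str.strip (PySem.Str.lower h)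

-- Python truthiness of a str-or-None variable ('if name_field:')
def pvTruthy (o : Option String) : Bool :=
  match o with
  | none => false
  | some s => !(s == "")

-- inner loop: 'for i, header in enumerate(headers_lower): if candidate in header: field = headers[i]; break'
-- (indexing headers[i] with i from enumerate(headers_lower) is ported by pairing each original
--  header with its lowered form; exact since both lists have the same length)
def pvInner (c : String) (pairs : List (String × String)) : Option String :=
  match pairs with
  | [] => none
  | p :: rest => if PySem.Str.isIn c p.2 then some p.1 else pvInner c rest

-- outer loop over the candidate list, threading the field accumulator
def pvOuter (cands : List String) (acc : Option String) (pairs : List (String × String)) : Option String :=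
  match cands with
  | [] => acc
  | c :: rest =>
    let acc' := match pvInner c pairs with
      | some h => some h
      | none => acc
    if pvTruthy acc' then acc' else pvOuter rest acc' pairs

def pvNameCands : List String := ["name", "full name", "fullname", "guest name", "guest", "person", "contact"]
def pvAddrCands : List String := ["address", "mailing address", "street address", "addr", "location", "home address"]
def pvNotesCands : List String := ["notes", "note", "comments", "comment", "description", "details", "info", "remarks"]
def pvFbCands : List String := ["facebook", "fb", "facebook profile", "fb profile", "social media", "facebook_profile"]

def detect_csv_fields (headers : List String) : List (String × Option String) :=
  let pairs := headers.zip (headers.map pvLowerStrip)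
  [("name", pvOuter pvNameCands none pairs),
   ("address", pvOuter pvAddrCands none pairs),
   ("notes", pvOuter pvNotesCands none pairs),
   ("facebook", pvOuter pvFbCands none pairs)]

-- ===== PORT B =====

def pvFieldCandidates : List (String × List String) :=
  [("name", ["name", "full name", "fullname", "guest name", "guest", "person", "contact"]),
   ("address", ["address", "mailing address", "street address", "addr", "location", "home address"]),
   ("notes", ["notes", "note", "comments", "comment", "description", "details", "info", "remarks"]),
   ("facebook", ["facebook", "fb", "facebook profile", "fb profile", "social media", "facebook_profile"])]

-- 'next((r for r, c in enumerate(candidates) if c in low), None)'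
def pvRank (cands : List String) (low : String) : Option Nat :=
  match cands with
  | [] => none
  | c :: rest => if PySem.Str.isIn c low then some 0 else (pvRank rest low).map (· + 1)

-- one step of the argmin loop body of _pick
def pvStep (cands : List String) (best : Option (Nat × String)) (orig : String) : Option (Nat × String) :=
  match pvRank cands (pvLowerStrip orig) with
  | none => best
  | some r =>
    match best with
    | none => some (r, orig)
    | some b => if r < b.1 then some (r, orig) else best

def pvPick (headers : List String) (cands : List String) : Option String :=
  (headers.foldl (pvStep cands) none).map Prod.snd

def detect_csv_fields_alt (headers : List String) : List (String × Option String) :=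
  pvFieldCandidates.map (fun kc => (kc.1, pvPick headers kc.2))

-- ===== PRECONDITION & SPEC =====
def Spec_detect_csv_fields (headers : List String) (out : List (String × Option String)) : Prop := out = detect_csv_fields_alt headers
instance (headers : List String) (out : List (String × Option String)) : Decidable (Spec_detect_csv_fields headers out) := by unfold Spec_detect_csv_fields; infer_instance

-- ===== CLAIM (what is proved, stated in full; the proofs are below) =====
def Claim_equal_detect_csv_fields : Prop := ∀ (headers : List String), Dom_detect_csv_fields headers → Spec_detect_csv_fields headers (detect_csv_fields headers)

-- ===== LEMMAS AND PROOFS =====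

-- B's loop body rephrased over (original, lowered) pairs
def pvStep' (cands : List String) (best : Option (Nat × String)) (p : String × String) : Option (Nat × String) :=
  match pvRank cands p.2 with
  | none => best
  | some r =>
    match best with
    | none => some (r, p.1)
    | some b => if r < b.1 then some (r, p.1) else best

def pvShift (b : Nat × String) : Nat × String := (b.1 + 1, b.2)

lemma pvInner_cons (c : String) (q : String × String) (qs : List (String × String)) :
    pvInner c (q :: qs) = if PySem.Str.isIn c q.2 then some q.1 else pvInner c qs := rfl

lemma pvRank_cons (c : String) (rest : List String) (low : String) :
    pvRank (c :: rest) low = if PySem.Str.isIn c low then some 0 else (pvRank rest low).map (· + 1) := rfl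

lemma pvFold_nil_cands (pairs : List (String × String)) :
    ∀ (best : Option (Nat × String)), pairs.foldl (pvStep' []) best = best := by
  induction pairs with
  | nil => intro best; rfl
  | cons p ps ih => intro best; simpa [pvStep', pvRank] using ih best

lemma pvInner_none (c : String) (pairs : List (String × String)) (h : pvInner c pairs = none) :
    ∀ p ∈ pairs, PySem.Str.isIn c p.2 = false := by
  induction pairs with
  | nil => intro p hp; cases hp
  | cons q qs ih =>
    rw [pvInner_cons] at h
    cases hq : PySem.Str.isIn c q.2 with
    | true => rw [hq] at h; simp at h
    | false =>
      rw [hq] at h; simp only [Bool.false_eq_true, if_false] at h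
      intro p hp
      rcases List.mem_cons.mp hp with rfl | hp
      · exact hq
      · exact ih h p hp

lemma pvInner_some (c : String) (pairs : List (String × String)) :
    ∀ a, pvInner c pairs = some a → ∃ l, (a, l) ∈ pairs ∧ PySem.Str.isIn c l = true := by
  induction pairs with
  | nil => intro a h; cases h
  | cons q qs ih =>
    intro a h
    rw [pvInner_cons] at h
    cases hq : PySem.Str.isIn c q.2 with
    | true =>
      rw [hq] at h; simp only [if_true] at h
      refine ⟨q.2, ?_, hq⟩
      rw [← Option.some_inj.mp h]
      exact List.mem_cons_self ..
    | false =>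
      rw [hq] at h; simp only [Bool.false_eq_true, if_false] at h
      rcases ih a h with ⟨l, hl, hil⟩
      exact ⟨l, List.mem_cons_of_mem _ hl, hil⟩

-- once a rank-0 best is installed, the fold never changes it (ranks are Nats)
lemma pvFold_zero_lock (c : String) (rest : List String) (a : String)
    (pairs : List (String × String)) :
    pairs.foldl (pvStep' (c :: rest)) (some (0, a)) = some (0, a) := by
  induction pairs with
  | nil => rfl
  | cons q qs ih =>
    have hstep : pvStep' (c :: rest) (some (0, a)) q = some (0, a) := by
      unfold pvStep'
      cases h : pvRank (c :: rest) q.2 with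
      | none => rfl
      | some r => simp
    rw [List.foldl_cons, hstep, ih]

-- if the inner scan finds a, the fold (started from a positive-rank best) ends at (0, a)
lemma pvFold_of_inner_some (c : String) (rest : List String) (pairs : List (String × String)) :
    ∀ (best : Option (Nat × String)) (a : String),
      (∀ b, best = some b → 0 < b.1) →
      pvInner c pairs = some a →
      pairs.foldl (pvStep' (c :: rest)) best = some (0, a) := by
  induction pairs with
  | nil => intro best a _ h; cases h
  | cons q qs ih =>
    intro best a hpos h
    rw [pvInner_cons] at h
    cases hq : PySem.Str.isIn c q.2 with
    | true =>
      rw [hq] at h; simp only [if_true] at h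
      have hstep : pvStep' (c :: rest) best q = some (0, q.1) := by
        unfold pvStep'
        rw [pvRank_cons, hq]
        simp only [if_true]
        cases best with
        | none => rfl
        | some b => simp [hpos b rfl]
      rw [List.foldl_cons, hstep, ← Option.some_inj.mp h, pvFold_zero_lock]
    | false =>
      rw [hq] at h; simp only [Bool.false_eq_true, if_false] at h
      have hstep_pos : ∀ b, pvStep' (c :: rest) best q = some b → 0 < b.1 := by
        intro b hb
        unfold pvStep' at hb
        rw [pvRank_cons, hq] at hb
        simp only [Bool.false_eq_true, if_false] at hb
        cases hr : pvRank rest q.2 with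
        | none => rw [hr] at hb; simp only [Option.map_none] at hb; exact hpos b hb
        | some r =>
          rw [hr] at hb
          simp only [Option.map_some] at hb
          cases best with
          | none => cases hb; simp
          | some b' =>
            have hb' : (if r + 1 < b'.1 then some (r + 1, q.1) else some b') = some b := hb
            by_cases hlt : r + 1 < b'.1
            · rw [if_pos hlt] at hb'; cases hb'; simp
            · rw [if_neg hlt] at hb'; exact hpos b hb'
      exact ih _ a hstep_pos h

-- if no header matches candidate c, prepending c just shifts every rank by one
lemma pvFold_shift (c : String) (rest : List String) (pairs : List (String × String)) :
    ∀ (best : Option (Nat × String)),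
      (∀ p ∈ pairs, PySem.Str.isIn c p.2 = false) →
      pairs.foldl (pvStep' (c :: rest)) (best.map pvShift)
        = (pairs.foldl (pvStep' rest) best).map pvShift := by
  induction pairs with
  | nil => intro best _; rfl
  | cons q qs ih =>
    intro best hall
    have hq : PySem.Str.isIn c q.2 = false := hall q (List.mem_cons_self ..)
    have hstep : pvStep' (c :: rest) (best.map pvShift) q = (pvStep' rest best q).map pvShift := by
      unfold pvStep'
      rw [pvRank_cons, hq]
      simp only [Bool.false_eq_true, if_false]
      cases hr : pvRank rest q.2 with
      | none => simp
      | some r =>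
        cases best with
        | none => rfl
        | some b =>
          obtain ⟨bn, bs⟩ := b
          simp only [Option.map_some, pvShift]
          by_cases hlt : r < bn
          · rw [if_pos hlt, if_pos (show r + 1 < bn + 1 by omega)]; simp [pvShift]
          · rw [if_neg hlt, if_neg (show ¬ r + 1 < bn + 1 by omega)]; simp [pvShift]
    rw [List.foldl_cons, List.foldl_cons, hstep, ih _ (fun p hp => hall p (List.mem_cons_of_mem _ hp))]

-- MAIN: A's candidate-major scan equals B's header-major argmin fold
lemma pvOuter_eq_fold (cands : List String) (hc : ∀ c ∈ cands, PySem.Str.isIn c "" = false) :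
    ∀ (pairs : List (String × String)), (∀ p ∈ pairs, p.1 = "" → p.2 = "") →
      pvOuter cands none pairs = (pairs.foldl (pvStep' cands) none).map Prod.snd := by
  induction cands with
  | nil => intro pairs _; rw [pvFold_nil_cands]; rfl
  | cons c rest ih =>
    intro pairs hp
    cases hin : pvInner c pairs with
    | none =>
      have hall := pvInner_none c pairs hin
      have lhs : pvOuter (c :: rest) none pairs = pvOuter rest none pairs := by
        simp [pvOuter, hin, pvTruthy]
      have hshift := pvFold_shift c rest pairs none hall
      simp only [Option.map_none] at hshift
      rw [lhs, ih (fun x hx => hc x (List.mem_cons_of_mem _ hx)) pairs hp, hshift,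
        Option.map_map]
      rfl
    | some a =>
      rcases pvInner_some c pairs a hin with ⟨l, hmem, hil⟩
      have hane : a ≠ "" := by
        intro ha
        have hl : l = "" := hp (a, l) hmem ha
        rw [hl, hc c (List.mem_cons_self ..)] at hil
        cases hil
      have lhs : pvOuter (c :: rest) none pairs = some a := by
        simp [pvOuter, hin, pvTruthy, hane]
      rw [lhs, pvFold_of_inner_some c rest pairs none a (by intro b hb; cases hb) hin]
      rfl

lemma pvZip_lower (headers : List String) :
    headers.zip (headers.map pvLowerStrip) = headers.map (fun h => (h, pvLowerStrip h)) := by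
  induction headers with
  | nil => rfl
  | cons h hs ih => simp [ih]

lemma pvPick_eq (headers : List String) (cands : List String)
    (hc : ∀ c ∈ cands, PySem.Str.isIn c "" = false) :
    pvOuter cands none (headers.zip (headers.map pvLowerStrip)) = pvPick headers cands := by
  rw [pvZip_lower]
  have hp : ∀ p ∈ headers.map (fun h => (h, pvLowerStrip h)), p.1 = "" → p.2 = "" := by
    intro p hp h1
    rcases List.mem_map.mp hp with ⟨x, _, rfl⟩
    simp only at h1 ⊢
    rw [h1]; rfl
  rw [pvOuter_eq_fold cands hc _ hp]
  unfold pvPick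
  rw [List.foldl_map]
  rfl

-- ===== VERDICT (by name: the statement is the Claim_ definition above) =====
theorem detect_csv_fields_spec : Claim_equal_detect_csv_fields := by
  intro headers _
  unfold Spec_detect_csv_fields detect_csv_fields detect_csv_fields_alt pvFieldCandidates
  simp only [List.map]
  rw [pvPick_eq headers pvNameCands (by decide),
    pvPick_eq headers pvAddrCands (by decide),
    pvPick_eq headers pvNotesCands (by decide),
    pvPick_eq headers pvFbCands (by decide)]
  rfl
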